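-- pv_equiv track=rewrite | github.com/alinursu/resume | PromoBot/scripts/EMAG/emag_string.py | reparator_nume_imagini
-- ===== SOURCE A (Python) =====
-- def reparator_nume_imagini(nume):
--     """
--     Functia primeste ca si parametru un string, reprezentand numele imaginilor unui produs, si verifica daca exista
--     caracterul " ' " in el si il elimina, in caz afirmativ pentru ca provoaca o eroare la codul HTML.
--     ex: "Casti Skullcandy Ink'd" => "Casti Skullcandy Inkd"
--     :param title:
--     :return:
--     """
--     if "'" in nume:
--         nume = nume.split("'")
--         _ = ""
--         for i in range(0, len(nume)):
--             _ = _ + nume[i]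
--         nume = _
--     return nume
-- ===== SOURCE B (Python) =====
-- def reparator_nume_imagini(nume):
--     return "".join(c for c in nume if c != "'")
-- ===== Notes on version B (the rewrite author's own statement) =====
-- stated objective: simpler
-- what changed: Replaces A's guard + split-on-apostrophe + index-loop concatenation of fragments with a single character-level filter joined into the result.
import Mathlib
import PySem

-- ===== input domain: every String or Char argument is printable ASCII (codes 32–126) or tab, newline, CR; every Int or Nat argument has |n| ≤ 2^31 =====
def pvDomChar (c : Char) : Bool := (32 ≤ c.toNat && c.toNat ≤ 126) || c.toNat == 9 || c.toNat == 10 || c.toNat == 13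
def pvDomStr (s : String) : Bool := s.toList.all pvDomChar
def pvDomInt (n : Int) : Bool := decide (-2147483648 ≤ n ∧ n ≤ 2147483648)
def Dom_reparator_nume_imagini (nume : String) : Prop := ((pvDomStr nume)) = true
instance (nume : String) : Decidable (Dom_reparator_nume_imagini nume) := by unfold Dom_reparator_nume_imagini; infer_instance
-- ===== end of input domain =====

-- B removes apostrophes with a single character-level filter instead of A's guard + split + index-loop concatenation; objective: simpler.

-- ===== PORT A =====
-- if "'" in nume: nume = nume.split("'"); _ = ""; for i in range(0, len(nume)): _ = _ + nume[i]; nume = _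
def reparator_nume_imagini (nume : String) : String :=
  if PySem.Str.isIn "'" nume then
    let parts : List (List Char) := PySem.Chars.splitOn nume.toList ['\'']
    let u : List Char :=
      (PySem.List.pyRange 0 (PySem.List.len parts) 1).foldl
        (fun acc i => acc ++ PySem.List.pyGetD parts i []) []
    String.ofList u
  else nume

-- ===== PORT B =====
-- "".join(c for c in nume if c != "'")
def reparator_nume_imagini_alt (nume : String) : String :=
  String.ofList (nume.toList.filter (fun c => c != '\''))

-- ===== PRECONDITION & SPEC =====
def Spec_reparator_nume_imagini (nume : String) (out : String) : Prop := out = reparator_nume_imagini_alt nume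
instance (nume : String) (out : String) : Decidable (Spec_reparator_nume_imagini nume out) := by unfold Spec_reparator_nume_imagini; infer_instance

-- ===== CLAIM (what is proved, stated in full; the proofs are below) =====
def Claim_equal_reparator_nume_imagini : Prop := ∀ (nume : String), Dom_reparator_nume_imagini nume → Spec_reparator_nume_imagini nume (reparator_nume_imagini nume)

-- ===== LEMMAS AND PROOFS =====

-- Flattening the pieces of a single-character split is filtering that character out.
theorem splitOn_go_flatten (q : Char) :
    ∀ (fuel : Nat) (l cur : List Char) (acc : List (List Char)),
      l.length < fuel →
      (PySem.Chars.splitOn.go [q] fuel l cur acc).flatten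
        = acc.reverse.flatten ++ cur.reverse ++ l.filter (fun c => c ≠ q) := by
  intro fuel
  induction fuel with
  | zero => intro l cur acc h; omega
  | succ n ih =>
    intro l cur acc h
    cases l with
    | nil => simp [PySem.Chars.splitOn.go]
    | cons c rest =>
      rw [PySem.Chars.splitOn.go]
      by_cases hq : c = q
      · subst hq
        simp only [List.isPrefixOf, BEq.rfl, Bool.true_and, if_true,
          List.length_cons, List.length_nil, List.drop_succ_cons, List.drop_zero]
        rw [ih rest [] ((cur.reverse) :: acc) (by simpa using Nat.lt_of_succ_lt_succ h)]
        simp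
      · have : ([q].isPrefixOf (c :: rest)) = false := by
          simp [List.isPrefixOf]; exact fun hh => absurd hh.symm hq
        rw [this]
        simp only [if_neg Bool.false_ne_true]
        rw [ih rest (c :: cur) acc (by simpa using Nat.lt_of_succ_lt_succ h)]
        simp [hq]

theorem splitOn_flatten (q : Char) (cs : List Char) :
    (PySem.Chars.splitOn cs [q]).flatten = cs.filter (fun c => c ≠ q) := by
  unfold PySem.Chars.splitOn
  rw [splitOn_go_flatten q (cs.length + 1) cs [] [] (Nat.lt_succ_self _)]
  simp

-- ===== VERDICT (by name: the statement is the Claim_ definition above) =====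
theorem reparator_nume_imagini_spec : Claim_equal_reparator_nume_imagini := by
  intro nume _
  unfold Spec_reparator_nume_imagini reparator_nume_imagini reparator_nume_imagini_alt
  by_cases h : PySem.Str.isIn "'" nume = true
  · rw [if_pos h]
    have hfold :
        (PySem.List.pyRange 0 (PySem.List.len (PySem.Chars.splitOn nume.toList ['\''])) 1).foldl
          (fun acc i => acc ++ PySem.List.pyGetD (PySem.Chars.splitOn nume.toList ['\'']) i []) ([] : List Char)
          = (PySem.Chars.splitOn nume.toList ['\'']).foldl (fun acc x => acc ++ x) [] := by
      simpa using
        PySem.List.foldl_pyRange_zero_pyGetD (xs := PySem.Chars.splitOn nume.toList ['\''])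
          (d := ([] : List Char)) (f := fun acc x => acc ++ x) (init := ([] : List Char))
    simp only [hfold, PySem.List.foldl_append_eq_flatten, List.nil_append,
      splitOn_flatten]
    congr 1
    apply List.filter_congr
    intro c _
    simp [bne, beq_eq_decide]
  · rw [if_neg h]
    have hmem : '\'' ∉ nume.toList := by
      intro hmem
      apply h
      rw [PySem.Str.isIn_iff_infix]
      show ['\''] <:+: nume.toList
      obtain ⟨pre, suf, hps⟩ := List.append_of_mem hmem
      exact ⟨pre, suf, by rw [hps]; simp⟩
    have : nume.toList.filter (fun c => c != '\'') = nume.toList := by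
      apply List.filter_eq_self.mpr
      intro a ha
      simp [bne]
      exact fun he => hmem (he ▸ ha)
    rw [this]
    exact String.ofList_toList.symm
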